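-- pv_equiv track=rewrite | github.com/greggubben/AoC2020 | day06/customs.py | findUniqueYes
-- ===== SOURCE A (Python) =====
-- def findUniqueYes(groups):
--     sumYes = 0
--
--     for group in groups:
--         questions = ""
--         for person in group:
--             for question in person:
--                 if questions.count(question) == 0:
--                     questions += question
--
--         sumYes += len(questions)
--
--     return sumYes
-- ===== SOURCE B (Python) =====
-- def findUniqueYes(groups):
--     total = 0
--     for group in groups:
--         chars = []
--         for person in group:
--             chars.extend(person)
--         chars.sort()
--         cnt = 0
--         prev = None
--         for c in chars:
--             if prev is None or c != prev:
--                 cnt += 1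
--             prev = c
--         total += cnt
--     return total
-- ===== Notes on version B (the rewrite author's own statement) =====
-- stated objective: alternative
-- what changed: Replaces A's quadratic build-a-dedup-string-with-count scan per group by flattening all answer characters, sorting them, and counting boundaries in one adjacent-comparison pass.
import Mathlib
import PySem

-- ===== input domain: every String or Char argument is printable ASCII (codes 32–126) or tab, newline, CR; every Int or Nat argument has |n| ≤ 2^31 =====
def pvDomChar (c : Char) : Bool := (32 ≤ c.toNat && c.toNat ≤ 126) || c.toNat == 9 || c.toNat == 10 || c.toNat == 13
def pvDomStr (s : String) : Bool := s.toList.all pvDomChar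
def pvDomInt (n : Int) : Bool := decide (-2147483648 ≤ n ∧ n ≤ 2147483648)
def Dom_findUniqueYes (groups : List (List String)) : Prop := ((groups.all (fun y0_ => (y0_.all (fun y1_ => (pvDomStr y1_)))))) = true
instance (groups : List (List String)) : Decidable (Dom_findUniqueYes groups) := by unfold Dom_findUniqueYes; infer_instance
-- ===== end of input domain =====

-- B replaces A's quadratic dedup-string accumulation by flatten + sort + one adjacent-comparison pass per group (alternative decomposition).

-- ===== PORT A =====
-- A's questions string is ported as its List Char; questions.count(q) == 0 is List.count, += is append.
def fuyStepA (qs : List Char) (q : Char) : List Char :=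
  if qs.count q == 0 then qs ++ [q] else qs

def findUniqueYes (groups : List (List String)) : Int :=
  groups.foldl (fun sumYes group =>
    let questions := group.foldl (fun qs person => person.toList.foldl fuyStepA qs) ([] : List Char)
    sumYes + (questions.length : Int)) 0

-- ===== PORT B =====
-- state = (cnt, prev); 'if prev is None or c != prev: cnt += 1; prev = c'
def fuyStepB (st : Int × Option Char) (c : Char) : Int × Option Char :=
  (match st.2 with
   | none => st.1 + 1
   | some p => if c ≠ p then st.1 + 1 else st.1, some c)

def findUniqueYes_alt (groups : List (List String)) : Int :=
  groups.foldl (fun total group =>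
    let chars := group.foldl (fun acc person => acc ++ person.toList) ([] : List Char)
    let s := PySem.List.sorted chars (fun c => c) false
    total + (s.foldl fuyStepB (0, none)).1) 0

-- ===== PRECONDITION & SPEC =====
def Spec_findUniqueYes (groups : List (List String)) (out : Int) : Prop := out = findUniqueYes_alt groups
instance (groups : List (List String)) (out : Int) : Decidable (Spec_findUniqueYes groups out) := by unfold Spec_findUniqueYes; infer_instance

-- ===== CLAIM (what is proved, stated in full; the proofs are below) =====
def Claim_equal_findUniqueYes : Prop := ∀ (groups : List (List String)), Dom_findUniqueYes groups → Spec_findUniqueYes groups (findUniqueYes groups)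

-- ===== LEMMAS AND PROOFS =====

-- A's inner dedup fold: result is duplicate-free and carries exactly the chars seen
theorem fuyA_spec (l : List Char) : ∀ (acc : List Char), acc.Nodup →
    (l.foldl fuyStepA acc).Nodup ∧ (l.foldl fuyStepA acc).toFinset = acc.toFinset ∪ l.toFinset := by
  induction l with
  | nil => intro acc h; simp [h]
  | cons c r ih =>
    intro acc h
    simp only [List.foldl_cons, fuyStepA]
    by_cases hc : c ∈ acc
    · rw [if_neg (by simp [List.count_eq_zero, hc])]
      obtain ⟨h1, h2⟩ := ih acc h
      refine ⟨h1, ?_⟩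
      rw [h2]; ext x
      simp only [Finset.mem_union, List.mem_toFinset, List.toFinset_cons, Finset.mem_insert]
      constructor
      · tauto
      · rintro (hx | rfl | hx)
        · exact Or.inl hx
        · exact Or.inl hc
        · exact Or.inr hx
    · rw [if_pos (by simp [List.count_eq_zero, hc])]
      obtain ⟨h1, h2⟩ := ih (acc ++ [c]) (by simp [List.nodup_append, h]; exact fun a ha hac => hc (hac ▸ ha))
      refine ⟨h1, ?_⟩
      rw [h2]; ext x; simp

-- B's flattening fold
theorem fuyB_flat (group : List String) : ∀ (acc : List Char),
    group.foldl (fun acc person => acc ++ person.toList) acc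
      = acc ++ (group.map String.toList).flatten := by
  induction group with
  | nil => intro acc; simp
  | cons p g ih => intro acc; simp [ih, List.append_assoc]

-- A's nested person/char loops are the char loop over the flattened group
theorem fuyA_flat (group : List String) : ∀ (acc : List Char),
    group.foldl (fun qs person => person.toList.foldl fuyStepA qs) acc
      = ((group.map String.toList).flatten).foldl fuyStepA acc := by
  induction group with
  | nil => intro acc; simp
  | cons p g ih => intro acc; simp [ih, List.foldl_append]

-- B's scan over a sorted tail starting after prev = p
theorem fuyB_scan (t : List Char) : ∀ (p : Char) (cnt : Int),
    t.Pairwise (· ≤ ·) → (∀ x ∈ t, p ≤ x) →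
    (t.foldl fuyStepB (cnt, some p)).1 = cnt + ((t.toFinset.erase p).card : Int) := by
  induction t with
  | nil => intro p cnt _ _; simp
  | cons c r ih =>
    intro p cnt hp hge
    have hpc : p ≤ c := hge c (by simp)
    have hr : r.Pairwise (· ≤ ·) := hp.of_cons
    have hcr : ∀ x ∈ r, c ≤ x := fun x hx => (List.pairwise_cons.mp hp).1 x hx
    simp only [List.foldl_cons, fuyStepB]
    by_cases hcp : c = p
    · subst hcp
      simp only [ne_eq, not_true_eq_false, if_false]
      rw [ih c cnt hr hcr]
      congr 2
      rw [List.toFinset_cons, Finset.erase_insert_eq_erase]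
    · rw [if_pos (by exact hcp)]
      rw [ih c (cnt + 1) hr hcr]
      have hplt : p < c := lt_of_le_of_ne hpc (fun h => hcp h.symm)
      have hpnot : p ∉ (c :: r).toFinset := by
        simp only [List.toFinset_cons, Finset.mem_insert, List.mem_toFinset]
        rintro (h | h)
        · exact absurd h.symm hcp
        · exact absurd (hcr p h) (not_le.mpr hplt)
      rw [Finset.erase_eq_of_notMem hpnot]
      have hins : insert c r.toFinset = insert c (r.toFinset.erase c) := by
        ext x; simp; tauto
      rw [List.toFinset_cons, hins,
        Finset.card_insert_of_notMem (Finset.notMem_erase c r.toFinset)]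
      push_cast
      ring

-- B's scan counts the distinct chars of a sorted list
theorem fuyB_group (s : List Char) (hp : s.Pairwise (· ≤ ·)) :
    (s.foldl fuyStepB (0, none)).1 = (s.toFinset.card : Int) := by
  cases s with
  | nil => simp
  | cons c r =>
    simp only [List.foldl_cons, fuyStepB]
    rw [fuyB_scan r c (0 + 1) hp.of_cons (fun x hx => (List.pairwise_cons.mp hp).1 x hx)]
    have hins : insert c r.toFinset = insert c (r.toFinset.erase c) := by
      ext x; simp; tauto
    rw [List.toFinset_cons, hins,
      Finset.card_insert_of_notMem (Finset.notMem_erase c r.toFinset)]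
    push_cast
    ring

-- both per-group contributions equal the number of distinct chars of the group
theorem group_eq (group : List String) :
    ((group.foldl (fun qs person => person.toList.foldl fuyStepA qs) ([] : List Char)).length : Int)
      = ((PySem.List.sorted (group.foldl (fun acc person => acc ++ person.toList) ([] : List Char))
            (fun c => c) false).foldl fuyStepB (0, none)).1 := by
  set flat := (group.map String.toList).flatten with hflat
  rw [fuyA_flat, fuyB_flat, List.nil_append, ← hflat]
  obtain ⟨hnd, hfs⟩ := fuyA_spec flat [] (by simp)
  have hperm : (PySem.List.sorted flat (fun c => c) false).Perm flat :=
    PySem.List.sorted_perm flat (fun c => c) false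
  have hsort : (PySem.List.sorted flat (fun c => c) false).Pairwise (· ≤ ·) :=
    PySem.List.sorted_pairwise flat (fun c => c)
  rw [fuyB_group _ hsort, List.toFinset_eq_of_perm _ _ hperm, ← List.toFinset_card_of_nodup hnd, hfs]
  simp

-- ===== VERDICT (by name: the statement is the Claim_ definition above) =====
theorem fuy_main (groups : List (List String)) : ∀ s : Int,
    groups.foldl (fun sumYes group =>
      sumYes + (((group.foldl (fun qs person => person.toList.foldl fuyStepA qs) ([] : List Char)).length : Int))) s
    = groups.foldl (fun total group =>
      total + ((PySem.List.sorted (group.foldl (fun acc person => acc ++ person.toList) ([] : List Char))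
        (fun c => c) false).foldl fuyStepB (0, none)).1) s := by
  induction groups with
  | nil => intro s; rfl
  | cons g gs ih =>
    intro s
    simp only [List.foldl_cons]
    rw [group_eq g]
    exact ih _

theorem findUniqueYes_spec : Claim_equal_findUniqueYes :=
  fun groups _ => fuy_main groups 0
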